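-- pv_equiv track=rewrite | github.com/jenni2503/Bachelorprosjekt | src/data/prompt.py | analyserOgAbstraherSata
-- ===== SOURCE A (Python) =====
-- def analyserOgAbstraherSata(data):
--     abstraksjon = {
--         "oversikt_over_kategorier": [],
--         "eksempler_på_varenumre": []
--     }
--
--     # Assuming each item in 'data' list is a dictionary with keys like 'varenummer' and 'beskrivelse'
--     for item in data:
--         varenummer = item.get("varenummer")
--         beskrivelse = item.get("beskrivelse")
--         kategori = item.get("kategori", "Ingen kategori")
--         underkategori = item.get("underkategori", "Ingen underkategori")
--
--         # For simplicity, let's consider 'kategori' as a category overview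
--         if kategori not in abstraksjon["oversikt_over_kategorier"]:
--             abstraksjon["oversikt_over_kategorier"].append(kategori)
--
--         # Constructing a simple representation of the item for example purposes
--         vare_sammendrag = f"Varenummer: {varenummer}, Beskrivelse: {beskrivelse}, Kategori: {kategori}, Underkategori: {underkategori}"
--         abstraksjon["eksempler_på_varenumre"].append(vare_sammendrag)
--
--     return abstraksjon
-- ===== SOURCE B (Python) =====
-- def analyserOgAbstraherSata(data):
--     # Two independent passes; categories deduped by repeatedly filtering the
--     # remaining suffix (worklist nub) -- no membership test, no accumulator scan.
--     def kat(item):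
--         return item.get("kategori", "Ingen kategori")
--
--     kategorier = []
--     rest = [kat(item) for item in data]
--     while rest:
--         head = rest[0]
--         kategorier.append(head)
--         rest = [c for c in rest[1:] if c != head]
--
--     eksempler = [
--         f"Varenummer: {item.get('varenummer')}, "
--         f"Beskrivelse: {item.get('beskrivelse')}, "
--         f"Kategori: {kat(item)}, "
--         f"Underkategori: {item.get('underkategori', 'Ingen underkategori')}"
--         for item in data
--     ]
--     return {
--         "oversikt_over_kategorier": kategorier,
--         "eksempler_på_varenumre": eksempler,
--     }
-- ===== Notes on version B (the rewrite author's own statement) =====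
-- stated objective: alternative
-- what changed: Splits A's single interleaved loop into two independent passes and replaces the membership-test dedup by a worklist nub that repeatedly filters all copies of the current head out of the remaining suffix, so no accumulator is ever scanned.
import Mathlib
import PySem

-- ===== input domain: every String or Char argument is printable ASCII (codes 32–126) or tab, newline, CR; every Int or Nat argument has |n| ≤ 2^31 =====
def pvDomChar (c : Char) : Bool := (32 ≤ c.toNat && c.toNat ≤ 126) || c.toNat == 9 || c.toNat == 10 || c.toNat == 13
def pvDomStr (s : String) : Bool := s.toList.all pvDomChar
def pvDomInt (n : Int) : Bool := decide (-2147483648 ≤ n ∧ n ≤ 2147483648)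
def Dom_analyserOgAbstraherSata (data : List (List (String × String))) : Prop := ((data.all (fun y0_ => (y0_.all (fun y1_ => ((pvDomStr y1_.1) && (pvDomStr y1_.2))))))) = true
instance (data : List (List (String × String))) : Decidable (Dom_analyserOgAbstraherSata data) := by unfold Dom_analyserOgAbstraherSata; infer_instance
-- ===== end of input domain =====

-- B splits A's single interleaved loop into two passes and dedups categories with a
-- worklist nub (filter the remaining suffix) instead of a membership test; objective: alternative.


-- f-string semantics of an Optional[str]: None prints as "None"
def pvFmtNone (v : Option String) : String :=
  match v with
  | some s => s
  | none => "None"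

-- ===== PORT A =====
def analyserOgAbstraherSata (data : List (List (String × String))) : List (String × List String) :=
  let abst := data.foldl
    (fun (abst : List String × List String) item =>
      let varenummer := PySem.Dict.get? (PySem.Dict.mk item) "varenummer"
      let beskrivelse := PySem.Dict.get? (PySem.Dict.mk item) "beskrivelse"
      let kategori := PySem.Dict.getD (PySem.Dict.mk item) "kategori" "Ingen kategori"
      let underkategori := PySem.Dict.getD (PySem.Dict.mk item) "underkategori" "Ingen underkategori"
      let oversikt := if !abst.1.contains kategori then abst.1 ++ [kategori] else abst.1
      let vare_sammendrag := "Varenummer: " ++ pvFmtNone varenummer ++ ", Beskrivelse: " ++ pvFmtNone beskrivelse ++ ", Kategori: " ++ kategori ++ ", Underkategori: " ++ underkategori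
      (oversikt, abst.2 ++ [vare_sammendrag]))
    ([], [])
  [("oversikt_over_kategorier", abst.1), ("eksempler_på_varenumre", abst.2)]

-- ===== PORT B =====
def pvKategoriAv (item : List (String × String)) : String :=
  PySem.Dict.getD (PySem.Dict.mk item) "kategori" "Ingen kategori"

def pvSammendragAv (item : List (String × String)) : String :=
  "Varenummer: " ++ pvFmtNone (PySem.Dict.get? (PySem.Dict.mk item) "varenummer")
    ++ ", Beskrivelse: " ++ pvFmtNone (PySem.Dict.get? (PySem.Dict.mk item) "beskrivelse")
    ++ ", Kategori: " ++ pvKategoriAv item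
    ++ ", Underkategori: " ++ PySem.Dict.getD (PySem.Dict.mk item) "underkategori" "Ingen underkategori"

-- the while loop of B: append the head, filter it out of the suffix, repeat
def pvNubLoop (kategorier rest : List String) : List String :=
  match rest with
  | [] => kategorier
  | head :: tail => pvNubLoop (kategorier ++ [head]) (tail.filter (fun c => c ≠ head))
termination_by rest.length
decreasing_by
  simp only [List.length_cons, List.length_unattach]
  exact Nat.lt_succ_of_le ((List.length_filter_le _ _).trans (Nat.le_of_eq List.length_attach))

def analyserOgAbstraherSata_alt (data : List (List (String × String))) : List (String × List String) :=
  let kategorier := pvNubLoop [] (data.map pvKategoriAv)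
  let eksempler := data.map pvSammendragAv
  [("oversikt_over_kategorier", kategorier), ("eksempler_på_varenumre", eksempler)]

-- ===== PRECONDITION & SPEC =====
def Spec_analyserOgAbstraherSata (data : List (List (String × String))) (out : List (String × List String)) : Prop := out = analyserOgAbstraherSata_alt data
instance (data : List (List (String × String))) (out : List (String × List String)) : Decidable (Spec_analyserOgAbstraherSata data out) := by unfold Spec_analyserOgAbstraherSata; infer_instance

-- ===== CLAIM =====
def Claim_equal_analyserOgAbstraherSata : Prop := ∀ (data : List (List (String × String))), Dom_analyserOgAbstraherSata data → Spec_analyserOgAbstraherSata data (analyserOgAbstraherSata data)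

-- ===== LEMMAS AND PROOFS =====

-- unfolding equations for the well-founded pvNubLoop
theorem pvNubLoop_nil (k : List String) : pvNubLoop k [] = k := by
  simp [pvNubLoop]

theorem pvNubLoop_cons (k : List String) (h : String) (t : List String) :
    pvNubLoop k (h :: t) = pvNubLoop (k ++ [h]) (t.filter (fun c => c ≠ h)) := by
  simp [pvNubLoop]

-- A's interleaved fold computed componentwise: membership-dedup fold and summary map
theorem pvLoopEq (data : List (List (String × String))) :
    ∀ cats sums : List String,
      data.foldl
        (fun (abst : List String × List String) item =>
          let varenummer := PySem.Dict.get? (PySem.Dict.mk item) "varenummer"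
          let beskrivelse := PySem.Dict.get? (PySem.Dict.mk item) "beskrivelse"
          let kategori := PySem.Dict.getD (PySem.Dict.mk item) "kategori" "Ingen kategori"
          let underkategori := PySem.Dict.getD (PySem.Dict.mk item) "underkategori" "Ingen underkategori"
          let oversikt := if !abst.1.contains kategori then abst.1 ++ [kategori] else abst.1
          let vare_sammendrag := "Varenummer: " ++ pvFmtNone varenummer ++ ", Beskrivelse: " ++ pvFmtNone beskrivelse ++ ", Kategori: " ++ kategori ++ ", Underkategori: " ++ underkategori
          (oversikt, abst.2 ++ [vare_sammendrag]))
        (cats, sums)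
      = ((data.map pvKategoriAv).foldl PySem.Set.add cats,
         sums ++ data.map pvSammendragAv) := by
  induction data with
  | nil => intro cats sums; simp
  | cons item rest ih =>
    intro cats sums
    simp only [List.foldl_cons, List.map_cons]
    rw [ih]
    simp [pvKategoriAv, pvSammendragAv, PySem.Set.add]

-- the membership-dedup fold equals the worklist nub of the not-yet-seen elements
theorem pvSetAdd_eq_nub (cs : List String) :
    ∀ acc : List String,
      cs.foldl PySem.Set.add acc = pvNubLoop acc (cs.filter (fun c => !acc.contains c)) := by
  induction cs with
  | nil => intro acc; simp [pvNubLoop_nil]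
  | cons c rest ih =>
    intro acc
    by_cases h : c ∈ acc
    · rw [List.foldl_cons]
      have hadd : PySem.Set.add acc c = acc := by simp [PySem.Set.add, h]
      rw [hadd, ih acc]
      congr 1
      simp [h]
    · rw [List.foldl_cons]
      have hadd : PySem.Set.add acc c = acc ++ [c] := by simp [PySem.Set.add, h]
      have hf : List.filter (fun x => !acc.contains x) (c :: rest)
          = c :: List.filter (fun x => !acc.contains x) rest := by
        simp [h]
      rw [hadd, ih (acc ++ [c]), hf, pvNubLoop_cons]
      congr 1
      rw [List.filter_filter]
      apply List.filter_congr
      intro x _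
      simp [eq_comm, Bool.and_comm]

-- ===== VERDICT =====
theorem analyserOgAbstraherSata_spec : Claim_equal_analyserOgAbstraherSata := by
  intro data _
  unfold Spec_analyserOgAbstraherSata analyserOgAbstraherSata analyserOgAbstraherSata_alt
  rw [pvLoopEq data [] [], pvSetAdd_eq_nub]
  simp
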